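-- pv_equiv track=rewrite | github.com/scarletfantasy/renderdoc-mcp | src/renderdoc_mcp/analysis/frame_analysis.py | _build_tail_chain
-- ===== SOURCE A (Python) =====
-- _TAIL_CATEGORIES = set(["setup", "copy_resolve", "ui_overlay", "presentation"])
--
-- def _build_tail_chain(passes):
--     if not passes:
--         return []
--
--     start_index = None
--     for index in range(len(passes) - 1, -1, -1):
--         category = passes[index]["category"]
--         if category in ("presentation", "ui_overlay"):
--             start_index = index
--         elif start_index is not None and category not in _TAIL_CATEGORIES:
--             break
--
--     if start_index is None:
--         return [dict(item) for item in passes[-3:]]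
--     return [dict(item) for item in passes[start_index:]]
-- ===== SOURCE B (Python) =====
-- _TAIL_CATEGORIES = set(["setup", "copy_resolve", "ui_overlay", "presentation"])
--
-- def _build_tail_chain(passes):
--     # find the index of the LAST presentation/ui_overlay pass
--     last_marker = None
--     for idx, item in enumerate(passes):
--         if item["category"] in ("presentation", "ui_overlay"):
--             last_marker = idx
--
--     if last_marker is None:
--         return [dict(item) for item in passes[-3:]]
--
--     # expand left across the run of tail-category passes ending at last_marker
--     run_left = last_marker
--     while run_left > 0 and passes[run_left - 1]["category"] in _TAIL_CATEGORIES: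
--         run_left -= 1
--
--     # the chain starts at the FIRST marker inside that run
--     start = last_marker
--     for i in range(run_left, last_marker + 1):
--         if passes[i]["category"] in ("presentation", "ui_overlay"):
--             start = i
--             break
--
--     return [dict(item) for item in passes[start:]]
-- ===== Notes on version B (the rewrite author's own statement) =====
-- stated objective: alternative
-- what changed: Replaces A's single stateful backward scan (mark/continue/break) with a three-phase decomposition: a forward scan for the last presentation/ui_overlay index, a leftward expansion across the tail-category run, and a forward search for the first marker inside that run.
import Mathlib
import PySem

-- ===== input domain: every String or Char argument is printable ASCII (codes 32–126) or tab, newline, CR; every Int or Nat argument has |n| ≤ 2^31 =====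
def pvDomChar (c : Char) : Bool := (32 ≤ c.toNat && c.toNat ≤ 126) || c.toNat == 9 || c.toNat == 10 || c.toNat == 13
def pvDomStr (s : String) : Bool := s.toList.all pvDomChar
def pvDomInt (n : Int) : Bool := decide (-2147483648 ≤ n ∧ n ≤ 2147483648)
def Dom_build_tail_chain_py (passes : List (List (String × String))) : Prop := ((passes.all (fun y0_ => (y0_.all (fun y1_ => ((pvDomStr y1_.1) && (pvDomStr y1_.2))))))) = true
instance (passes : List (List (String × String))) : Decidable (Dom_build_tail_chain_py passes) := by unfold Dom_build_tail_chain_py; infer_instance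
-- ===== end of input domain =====

-- B replaces A's single stateful backward scan with a find-last-marker / expand-run / find-first-marker decomposition (same cost).


-- shared Python-semantics helpers (dict view of a pass; category tests)
-- item["category"]: Python-dict lookup (last duplicate wins); exact under Pre_ (key present)
def catOf (p : List (String × String)) : String := (PySem.Dict.ofList p).getD "category" ""
-- passes[i]["category"] for an index produced by the loops (always in range there)
def catD (passes : List (List (String × String))) (i : Int) : String := catOf (PySem.List.pyGetD passes i [])
-- membership in ("presentation", "ui_overlay")
def isMarker (c : String) : Bool := c == "presentation" || c == "ui_overlay"
-- membership in _TAIL_CATEGORIES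
def isTail (c : String) : Bool := c == "setup" || c == "copy_resolve" || c == "ui_overlay" || c == "presentation"
-- dict(item): canonical Python-dict copy
def pyDictCopy (p : List (String × String)) : List (String × String) := (PySem.Dict.ofList p).items

-- ===== PORT A =====
-- 'for index in range(len(passes)-1, -1, -1): …' with start_index state and break
def aLoop (passes : List (List (String × String))) : List Int → Option Int → Option Int
  | [], si => si
  | i :: rest, si =>
    let c := catD passes i
    if isMarker c then aLoop passes rest (some i)
    else if si.isSome && !(isTail c) then si          -- break: return current start_index
    else aLoop passes rest si

def build_tail_chain_py (passes : List (List (String × String))) : List (List (String × String)) :=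
  if passes.isEmpty then []
  else
    match aLoop passes (PySem.List.pyRange ((passes.length : Int) - 1) (-1) (-1)) none with
    | none => (PySem.List.slice passes (some (-3)) none).map pyDictCopy
    | some i => (PySem.List.slice passes (some i) none).map pyDictCopy

-- ===== PORT B =====
-- forward scan: index of the last presentation/ui_overlay pass
def bLastMarker (passes : List (List (String × String))) : Option Int :=
  (PySem.List.enumerate passes).foldl (fun j ip => if isMarker (catOf ip.2) then some ip.1 else j) none

-- 'while run_left > 0 and passes[run_left-1]["category"] in _TAIL_CATEGORIES: run_left -= 1'
def bExpand (passes : List (List (String × String))) (r : Int) : Int :=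
  if h : 0 < r ∧ isTail (catD passes (r - 1)) then bExpand passes (r - 1) else r
termination_by r.toNat
decreasing_by omega

-- 'for i in range(run_left, last_marker+1): if marker: start = i; break' (find?-with-default = loop with break)
def bStart (passes : List (List (String × String))) (r j : Int) : Int :=
  ((PySem.List.pyRange r (j + 1) 1).find? (fun i => isMarker (catD passes i))).getD j

def build_tail_chain_py_alt (passes : List (List (String × String))) : List (List (String × String)) :=
  match bLastMarker passes with
  | none => (PySem.List.slice passes (some (-3)) none).map pyDictCopy
  | some j =>
    let r := bExpand passes j
    (PySem.List.slice passes (some (bStart passes r j)) none).map pyDictCopy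

-- ===== PRECONDITION & SPEC =====
-- Pre_ excludes inputs where some pass lacks the "category" key: A raises KeyError on any pass it reads
-- without it, and returns there only when that pass is shadowed by an earlier break (B's forward scan raises).
def Pre_build_tail_chain_py (passes : List (List (String × String))) : Prop :=
  ∀ p ∈ passes, "category" ∈ p.map Prod.fst
instance (passes : List (List (String × String))) : Decidable (Pre_build_tail_chain_py passes) := by unfold Pre_build_tail_chain_py; infer_instance

def pvWitness_build_tail_chain_py : (List (List (String × String))) := [[("category", "presentation")]]

def Spec_build_tail_chain_py (passes : List (List (String × String))) (out : List (List (String × String))) : Prop := out = build_tail_chain_py_alt passes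
instance (passes : List (List (String × String))) (out : List (List (String × String))) : Decidable (Spec_build_tail_chain_py passes out) := by unfold Spec_build_tail_chain_py; infer_instance

-- ===== CLAIM (what is proved, stated in full; the proofs are below) =====
def Claim_equal_build_tail_chain_py : Prop := ∀ (passes : List (List (String × String))), Dom_build_tail_chain_py passes → Pre_build_tail_chain_py passes → Spec_build_tail_chain_py passes (build_tail_chain_py passes)

-- ===== LEMMAS AND PROOFS =====

-- a marker category is a tail category
theorem isTail_of_isMarker {c : String} (h : isMarker c = true) : isTail c = true := by
  simp [isMarker] at h
  rcases h with h | h <;> simp [isTail, h]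

-- reference backward walk both sides are reduced to
def best (passes : List (List (String × String))) (s t : Int) : Int :=
  if h : 0 < t ∧ isTail (catD passes (t - 1)) then
    best passes (if isMarker (catD passes (t - 1)) then t - 1 else s) (t - 1)
  else s
termination_by t.toNat
decreasing_by omega

theorem aLoop_best (passes : List (List (String × String))) :
    ∀ t s : Int, 0 ≤ t →
      aLoop passes (PySem.List.pyRange (t - 1) (-1) (-1)) (some s) = some (best passes s t) := by
  intro t s ht
  induction hn : t.toNat using Nat.strong_induction_on generalizing t s with
  | _ n IH =>
    rw [best]
    by_cases hpos : 0 < t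
    · rw [PySem.List.pyRange_neg_one_cons (by omega)]
      by_cases hm : isMarker (catD passes (t - 1)) = true
      · simp only [aLoop, hm, if_true]
        rw [IH (t - 1).toNat (by omega) (t - 1) (t - 1) (by omega) rfl]
        simp [hpos, isTail_of_isMarker hm]
      · by_cases htl : isTail (catD passes (t - 1)) = true
        · simp only [aLoop, hm, htl]
          simp only [Option.isSome_some, Bool.true_and, Bool.not_true]
          rw [IH (t - 1).toNat (by omega) (t - 1) s (by omega) rfl]
          simp [hpos]
        · simp only [aLoop, hm, htl]
          simp [hpos]
    · have : t = 0 := by omega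
      subst this
      rw [PySem.List.pyRange_neg_one_eq_nil (by omega)]
      simp [aLoop]

theorem aLoop_skip (passes : List (List (String × String))) (j : Int) (hj : 0 ≤ j) :
    ∀ a : Int, j ≤ a → a < passes.length →
      (∀ k : Int, j < k → k < passes.length → isMarker (catD passes k) = false) →
      aLoop passes (PySem.List.pyRange a (-1) (-1)) none
        = aLoop passes (PySem.List.pyRange j (-1) (-1)) none := by
  intro a ha han hmk
  induction hn : (a - j).toNat using Nat.strong_induction_on generalizing a with
  | _ n IH =>
    by_cases heq : a = j
    · rw [heq]
    · rw [PySem.List.pyRange_neg_one_cons (by omega)]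
      have hm : isMarker (catD passes a) = false := hmk a (by omega) han
      simp only [aLoop, hm, Bool.false_eq_true, if_false, Option.isSome_none, Bool.false_and,
        if_false]
      exact IH (a - 1 - j).toNat (by omega) (a - 1) (by omega) (by omega) rfl

theorem aLoop_none (passes : List (List (String × String))) :
    ∀ a : Int, a < passes.length →
      (∀ k : Int, 0 ≤ k → k < passes.length → isMarker (catD passes k) = false) →
      aLoop passes (PySem.List.pyRange a (-1) (-1)) none = none := by
  intro a han hmk
  induction hn : (a + 1).toNat using Nat.strong_induction_on generalizing a with
  | _ n IH =>
    by_cases hneg : a < 0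
    · rw [PySem.List.pyRange_neg_one_eq_nil (by omega)]
      rfl
    · rw [PySem.List.pyRange_neg_one_cons (by omega)]
      have hm : isMarker (catD passes a) = false := hmk a (by omega) han
      simp only [aLoop, hm, Bool.false_eq_true, if_false, Option.isSome_none, Bool.false_and,
        if_false]
      exact IH a.toNat (by omega) (a - 1) (by omega) (by omega)

theorem enumerate_append_singleton {α : Type} (xs : List α) (x : α) :
    ∀ s : Int, PySem.List.enumerate (xs ++ [x]) s
      = PySem.List.enumerate xs s ++ [(s + xs.length, x)] := by
  induction xs with
  | nil => intro s; simp [PySem.List.enumerate_cons, PySem.List.enumerate_nil]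
  | cons y ys ih =>
    intro s
    simp only [List.cons_append, PySem.List.enumerate_cons, ih (s + 1), List.length_cons]
    push_cast
    have : (s + 1 : Int) + (ys.length : Int) = s + ((ys.length : Int) + 1) := by omega
    rw [this]

theorem catD_append (xs : List (List (String × String))) (x : List (String × String)) :
    ∀ k : Int, 0 ≤ k → k < xs.length → catD (xs ++ [x]) k = catD xs k := by
  intro k h0 hk
  unfold catD
  congr 1
  rw [PySem.List.pyGetD_eq_getElem (xs ++ [x]) [] (by omega) (by simp; omega),
      PySem.List.pyGetD_eq_getElem xs [] h0 (by omega)]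
  rw [List.getElem_append_left (by omega)]

theorem catD_last (xs : List (List (String × String))) (x : List (String × String)) :
    catD (xs ++ [x]) xs.length = catOf x := by
  unfold catD
  congr 1
  rw [PySem.List.pyGetD_eq_getElem (xs ++ [x]) [] (by omega) (by simp)]
  simp

theorem bLastMarker_spec (passes : List (List (String × String))) :
    (bLastMarker passes = none ∧
      (∀ k : Int, 0 ≤ k → k < passes.length → isMarker (catD passes k) = false)) ∨
    (∃ i : Int, bLastMarker passes = some i ∧ 0 ≤ i ∧ i < passes.length ∧
      isMarker (catD passes i) = true ∧
      (∀ k : Int, i < k → k < passes.length → isMarker (catD passes k) = false)) := by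
  induction passes using List.reverseRecOn with
  | nil =>
    left
    refine ⟨rfl, ?_⟩
    intro k h0 hk
    simp at hk
    omega
  | append_singleton xs x ih =>
    have hfold : bLastMarker (xs ++ [x])
        = if isMarker (catOf x) then some (xs.length : Int) else bLastMarker xs := by
      unfold bLastMarker
      rw [enumerate_append_singleton xs x 0, List.foldl_append]
      simp
    by_cases hm : isMarker (catOf x) = true
    · right
      refine ⟨xs.length, ?_, by omega, by simp, ?_, ?_⟩
      · rw [hfold, if_pos hm]
      · rw [catD_last]; exact hm
      · intro k h1 h2; simp at h2; omega
    · rcases ih with ⟨hnone, hall⟩ | ⟨i, hi, h0, hlen, hmi, hup⟩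
      · left
        refine ⟨by rw [hfold, if_neg hm, hnone], ?_⟩
        intro k h0 hk
        simp only [List.length_append, List.length_singleton] at hk
        by_cases hke : k = xs.length
        · subst hke; rw [catD_last]; simpa using hm
        · rw [catD_append xs x k h0 (by push_cast at hk ⊢; omega)]
          exact hall k h0 (by push_cast at hk ⊢; omega)
      · right
        refine ⟨i, by rw [hfold, if_neg hm, hi], h0, by simp; omega, ?_, ?_⟩
        · rw [catD_append xs x i h0 hlen]; exact hmi
        · intro k h1 h2
          simp only [List.length_append, List.length_singleton] at h2
          by_cases hke : k = xs.length
          · subst hke; rw [catD_last]; simpa using hm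
          · rw [catD_append xs x k (by omega) (by push_cast at h2 ⊢; omega)]
            exact hup k h1 (by push_cast at h2 ⊢; omega)

theorem find_range_least (passes : List (List (String × String))) (j : Int) :
    ∀ a s : Int, a ≤ s → s ≤ j → isMarker (catD passes s) = true →
      (∀ y : Int, a ≤ y → y < s → isMarker (catD passes y) = false) →
      (PySem.List.pyRange a (j + 1) 1).find? (fun i => isMarker (catD passes i)) = some s := by
  intro a s has hsj hms hlt
  induction hn : (s - a).toNat using Nat.strong_induction_on generalizing a with
  | _ n IH =>
    rw [PySem.List.pyRange_one_cons (by omega)]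
    by_cases heq : a = s
    · subst heq
      simp [List.find?, hms]
    · have hma : isMarker (catD passes a) = false := hlt a le_rfl (by omega)
      simp only [List.find?_cons, hma]
      exact IH (s - (a + 1)).toNat (by omega) (a + 1) (by omega)
        (fun y hy1 hy2 => hlt y (by omega) hy2) (by omega)

theorem bStart_best (passes : List (List (String × String))) (j : Int) :
    ∀ t s : Int, 0 ≤ t → t ≤ s → s ≤ j → isMarker (catD passes s) = true →
      (∀ y : Int, t ≤ y → y < s → isMarker (catD passes y) = false) →
      bStart passes (bExpand passes t) j = best passes s t := by
  intro t s ht hts hsj hms hlt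
  induction hn : t.toNat using Nat.strong_induction_on generalizing t s with
  | _ n IH =>
    rw [bExpand, best]
    by_cases hc : 0 < t ∧ isTail (catD passes (t - 1)) = true
    · rw [dif_pos hc, dif_pos hc]
      by_cases hm : isMarker (catD passes (t - 1)) = true
      · rw [if_pos hm]
        exact IH (t - 1).toNat (by omega) (t - 1) (t - 1) (by omega) (le_refl _) (by omega) hm
          (fun y h1 h2 => by omega) (by omega)
      · rw [if_neg hm]
        exact IH (t - 1).toNat (by omega) (t - 1) s (by omega) (by omega) hsj hms
          (fun y h1 h2 => by
            by_cases hy : y = t - 1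
            · subst hy; simpa using hm
            · exact hlt y (by omega) h2) (by omega)
    · rw [dif_neg hc, dif_neg hc]
      unfold bStart
      rw [find_range_least passes j t s hts hsj hms hlt]
      rfl

-- ===== VERDICT (by name: the statement is the Claim_ definition above) =====
theorem build_tail_chain_py_spec : Claim_equal_build_tail_chain_py := by
  intro passes hdom hpre
  unfold Spec_build_tail_chain_py build_tail_chain_py build_tail_chain_py_alt
  by_cases hemp : passes = []
  · subst hemp
    rfl
  · rw [if_neg (by simpa [List.isEmpty_iff] using hemp)]
    have hn : 0 < passes.length := List.length_pos_iff.mpr hemp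
    rcases bLastMarker_spec passes with ⟨hnone, hall⟩ | ⟨i, hi, h0, hlen, hmi, hup⟩
    · rw [hnone]
      rw [aLoop_none passes ((passes.length : Int) - 1) (by omega) hall]
    · rw [hi]
      have hA : aLoop passes (PySem.List.pyRange ((passes.length : Int) - 1) (-1) (-1)) none
          = some (best passes i i) := by
        rw [aLoop_skip passes i h0 ((passes.length : Int) - 1) (by omega) (by omega) hup]
        rw [PySem.List.pyRange_neg_one_cons (by omega)]
        simp only [aLoop, hmi, if_true]
        exact aLoop_best passes i i h0
      rw [hA]
      show List.map pyDictCopy (PySem.List.slice passes (some (best passes i i)))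
          = List.map pyDictCopy (PySem.List.slice passes (some (bStart passes (bExpand passes i) i)))
      rw [bStart_best passes i i i h0 le_rfl le_rfl hmi (fun y h1 h2 => by omega)]
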